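-- pv_equiv track=rewrite | github.com/RayHuang1015/TofelListenAI | services/offline_news_tts.py | _format_content_for_anchor
-- ===== SOURCE A (Python) =====
-- def _format_content_for_anchor(content: str, target_words: int) -> str:
--     """Format content in news anchor style with proper pacing"""
--
--     if not content:
--         return "Details are still developing and will be provided as they become available."
--
--     # Clean and split content
--     content = content.replace('\n', ' ').replace('\r', ' ')
--     sentences = [s.strip() for s in content.split('.') if s.strip()]
--
--     formatted_sentences = []
--     word_count = 0
--
--     for i, sentence in enumerate(sentences):
--         if not sentence:
--             continue
--
--         # Add news anchor phrasing for first sentence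
--         if i == 0 and not sentence.lower().startswith(('according to', 'reports indicate', 'sources confirm')):
--             sentence = f"According to reports, {sentence.lower()}"
--
--         # Add emphasis for key terms
--         if any(word in sentence.lower() for word in ['breaking', 'urgent', 'crisis', 'emergency']):
--             sentence = f"In a developing situation, {sentence.lower()}"
--
--         # Check word count
--         words_in_sentence = len(sentence.split())
--         if word_count + words_in_sentence > target_words:
--             break
--
--         formatted_sentences.append(sentence)
--         word_count += words_in_sentence
--
--     result = '. '.join(formatted_sentences)
--     if result and not result.endswith('.'):
--         result += '.'
--
--     return result or "Details are developing and updates will follow."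
-- ===== SOURCE B (Python) =====
-- OPENERS = ('according to', 'reports indicate', 'sources confirm')
-- KEYWORDS = ('breaking', 'urgent', 'crisis', 'emergency')
--
--
-- def _transform(i, s):
--     """Fully transform one sentence (anchor prefix on sentence 0, emphasis prefix on keyword hits)."""
--     if i == 0 and not s.lower().startswith(OPENERS):
--         s = f"According to reports, {s.lower()}"
--     if any(w in s.lower() for w in KEYWORDS):
--         s = f"In a developing situation, {s.lower()}"
--     return s
--
--
-- def _format_content_for_anchor(content: str, target_words: int) -> str:
--     if not content:
--         return "Details are still developing and will be provided as they become available."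
--     cleaned = content.replace('\n', ' ').replace('\r', ' ')
--     sentences = [s.strip() for s in cleaned.split('.') if s.strip()]
--     # map first: transform every sentence up front
--     transformed = [_transform(i, s) for i, s in enumerate(sentences)]
--     # cumulative word totals, then cut at the first total exceeding the budget
--     totals = []
--     t = 0
--     for s in transformed:
--         t += len(s.split())
--         totals.append(t)
--     cut = next((i for i, tot in enumerate(totals) if tot > target_words), len(transformed))
--     result = '. '.join(transformed[:cut])
--     if result and not result.endswith('.'):
--         result += '.'
--     return result or "Details are developing and updates will follow."
-- ===== Notes on version B (the rewrite author's own statement) =====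
-- stated objective: alternative
-- what changed: A's single fused loop (transform each sentence, keep a running word count, break on budget overflow) is replaced by a map that transforms all sentences first, a cumulative word-total list, and a single cut index at the first total exceeding target_words, then a slice and join.
import Mathlib
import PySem

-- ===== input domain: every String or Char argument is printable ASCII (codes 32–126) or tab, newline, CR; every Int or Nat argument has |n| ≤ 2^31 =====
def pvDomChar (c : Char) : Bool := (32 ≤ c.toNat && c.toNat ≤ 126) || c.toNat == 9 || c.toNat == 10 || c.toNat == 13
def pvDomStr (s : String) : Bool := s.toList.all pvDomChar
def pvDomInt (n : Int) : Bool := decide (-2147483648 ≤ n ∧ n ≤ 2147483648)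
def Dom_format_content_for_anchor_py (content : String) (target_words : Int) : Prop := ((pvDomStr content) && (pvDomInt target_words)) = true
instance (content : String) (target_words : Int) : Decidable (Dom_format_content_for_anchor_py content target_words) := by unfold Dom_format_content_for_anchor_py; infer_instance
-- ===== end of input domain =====

-- B restructures A's single fused loop (transform + greedy word-budget break) into map-then-
-- cumulative-totals-then-cut; same return value, objective: alternative decomposition.

-- ===== PORT A =====
def pvOpeners : List String := ["according to", "reports indicate", "sources confirm"]
def pvKeywords : List String := ["breaking", "urgent", "crisis", "emergency"]

-- A's for-loop with break, as structural recursion over the enumerated sentences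
def pvALoop (tw : Int) : List (Int × String) → Int → List String → List String
  | [], _, acc => acc
  | (i, sentence) :: rest, wc, acc =>
    if sentence = "" then pvALoop tw rest wc acc
    else
      let s1 := if i = 0 ∧ (pvOpeners.all (fun p => !(PySem.Str.startswith (PySem.Str.lower sentence) p))) = true then
          "According to reports, " ++ PySem.Str.lower sentence else sentence
      let s2 := if (pvKeywords.any (fun w => PySem.Str.isIn w (PySem.Str.lower s1))) = true then
          "In a developing situation, " ++ PySem.Str.lower s1 else s1
      let w : Int := ((PySem.Str.split₀ s2).length : Int)
      if wc + w > tw then acc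
      else pvALoop tw rest (wc + w) (acc ++ [s2])

def format_content_for_anchor_py (content : String) (target_words : Int) : String :=
  if content = "" then
    "Details are still developing and will be provided as they become available."
  else
    let cleaned := PySem.Str.replace (PySem.Str.replace content "\n" " ") "\r" " "
    let sentences := (((PySem.Str.split? cleaned ".").getD []).map PySem.Str.strip).filter (fun s => s ≠ "")
    let fs := pvALoop target_words (PySem.List.enumerate sentences) 0 []
    let result := PySem.Str.join ". " fs
    let result := if result ≠ "" ∧ ¬ (PySem.Str.endswith result "." = true) then result ++ "." else result
    if result = "" then "Details are developing and updates will follow." else result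

-- ===== PORT B =====
def pvTransform (i : Int) (s : String) : String :=
  let s1 := if i = 0 ∧ (pvOpeners.all (fun p => !(PySem.Str.startswith (PySem.Str.lower s) p))) = true then
      "According to reports, " ++ PySem.Str.lower s else s
  if (pvKeywords.any (fun w => PySem.Str.isIn w (PySem.Str.lower s1))) = true then
      "In a developing situation, " ++ PySem.Str.lower s1 else s1

-- Source B's running-total loop: cumulative word counts of the transformed sentences
def pvAccum : Int → List String → List Int
  | _, [] => []
  | t, s :: rest => (t + ((PySem.Str.split₀ s).length : Int)) :: pvAccum (t + ((PySem.Str.split₀ s).length : Int)) rest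

def format_content_for_anchor_py_alt (content : String) (target_words : Int) : String :=
  if content = "" then
    "Details are still developing and will be provided as they become available."
  else
    let cleaned := PySem.Str.replace (PySem.Str.replace content "\n" " ") "\r" " "
    let sentences := (((PySem.Str.split? cleaned ".").getD []).map PySem.Str.strip).filter (fun s => s ≠ "")
    let transformed := (PySem.List.enumerate sentences).map (fun p => pvTransform p.1 p.2)
    let totals := pvAccum 0 transformed
    let cut := (totals.findIdx? (fun tot => decide (tot > target_words))).getD transformed.length
    let result := PySem.Str.join ". " (transformed.take cut)
    let result := if result ≠ "" ∧ ¬ (PySem.Str.endswith result "." = true) then result ++ "." else result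
    if result = "" then "Details are developing and updates will follow." else result

-- ===== PRECONDITION & SPEC =====
def Spec_format_content_for_anchor_py (content : String) (target_words : Int) (out : String) : Prop := out = format_content_for_anchor_py_alt content target_words
instance (content : String) (target_words : Int) (out : String) : Decidable (Spec_format_content_for_anchor_py content target_words out) := by unfold Spec_format_content_for_anchor_py; infer_instance

-- ===== CLAIM (what is proved, stated in full; the proofs are below) =====
def Claim_equal_format_content_for_anchor_py : Prop := ∀ (content : String) (target_words : Int), Dom_format_content_for_anchor_py content target_words → Spec_format_content_for_anchor_py content target_words (format_content_for_anchor_py content target_words)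

-- ===== LEMMAS AND PROOFS =====
theorem pvLoop_eq_cut (tw : Int) (l : List String) :
    ∀ (k wc : Int) (acc : List String), (∀ s ∈ l, s ≠ "") →
    pvALoop tw (PySem.List.enumerate l k) wc acc =
      acc ++ ((PySem.List.enumerate l k).map (fun p => pvTransform p.1 p.2)).take
        (((pvAccum wc ((PySem.List.enumerate l k).map (fun p => pvTransform p.1 p.2))).findIdx?
            (fun tot => decide (tot > tw))).getD
          ((PySem.List.enumerate l k).map (fun p => pvTransform p.1 p.2)).length) := by
  induction l with
  | nil =>
    intro k wc acc _
    simp only [PySem.List.enumerate_nil, List.map_nil, pvALoop, pvAccum, List.findIdx?_nil,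
      Option.getD_none, List.take_nil, List.append_nil]
  | cons s rest ih =>
    intro k wc acc hne
    have hs : s ≠ "" := hne s (List.mem_cons_self ..)
    rw [PySem.List.enumerate_cons]
    have hstep : pvALoop tw ((k, s) :: PySem.List.enumerate rest (k+1)) wc acc =
        if wc + ((PySem.Str.split₀ (pvTransform k s)).length : Int) > tw then acc
        else pvALoop tw (PySem.List.enumerate rest (k+1))
              (wc + ((PySem.Str.split₀ (pvTransform k s)).length : Int))
              (acc ++ [pvTransform k s]) := by
      rw [pvALoop, if_neg hs]
      rfl
    rw [hstep]
    rw [List.map_cons, show ∀ x TL, pvAccum wc (x :: TL) =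
          (wc + ((PySem.Str.split₀ x).length : Int)) ::
            pvAccum (wc + ((PySem.Str.split₀ x).length : Int)) TL from fun _ _ => rfl,
        List.findIdx?_cons]
    by_cases hgt : wc + ((PySem.Str.split₀ (pvTransform k s)).length : Int) > tw
    · rw [if_pos hgt]
      simp only [decide_eq_true hgt, if_true, Option.getD_some, List.take_zero, List.append_nil]
    · rw [if_neg hgt]
      simp only [decide_eq_false hgt, Bool.false_eq_true, if_false]
      rw [ih (k+1) (wc + ((PySem.Str.split₀ (pvTransform k s)).length : Int))
            (acc ++ [pvTransform k s]) (fun x hx => hne x (List.mem_cons_of_mem _ hx))]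
      rcases hfi : (pvAccum (wc + ((PySem.Str.split₀ (pvTransform k s)).length : Int))
          ((PySem.List.enumerate rest (k+1)).map (fun p => pvTransform p.1 p.2))).findIdx?
            (fun tot => decide (tot > tw)) with _ | j
      · rw [hfi]
        simp only [Option.map_none, Option.getD_none, List.length_cons, List.take_succ_cons,
          List.take_length, List.append_assoc, List.singleton_append]
      · rw [hfi]
        simp only [Option.map_some, Option.getD_some, List.take_succ_cons, List.append_assoc,
          List.singleton_append]

-- ===== VERDICT (by name: the statement is the Claim_ definition above) =====
theorem format_content_for_anchor_py_spec : Claim_equal_format_content_for_anchor_py := by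
  intro content target_words _
  unfold Spec_format_content_for_anchor_py format_content_for_anchor_py format_content_for_anchor_py_alt
  by_cases hc : content = ""
  · rw [if_pos hc, if_pos hc]
  · rw [if_neg hc, if_neg hc]
    simp only []
    have hnn : ∀ s ∈ ((((PySem.Str.split? (PySem.Str.replace
          (PySem.Str.replace content "\n" " ") "\r" " ") ".").getD []).map
          PySem.Str.strip).filter (fun s => s ≠ "")), s ≠ "" := by
      generalize (((PySem.Str.split? (PySem.Str.replace
          (PySem.Str.replace content "\n" " ") "\r" " ") ".").getD []).map
          PySem.Str.strip) = L
      intro s hs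
      rw [List.mem_filter] at hs
      exact of_decide_eq_true hs.2
    have key := pvLoop_eq_cut target_words _ 0 0 [] hnn
    rw [List.nil_append] at key
    rw [key]
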